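-- pv_equiv track=rewrite | github.com/manas234das/Contextual_Qtn_Ans_using_BERT | subParas.py | samplePara
-- ===== SOURCE A (Python) =====
-- def subPara(paragraph):
--     # paragraph length
--     para_len = len(paragraph)
--     _final_para = []
--     if(para_len > 18):
--         _final_para.append(".".join(paragraph[0:para_len//2]))
--         _final_para.append(".".join(paragraph[para_len//2:para_len+1]))
--         return _final_para
--     else:
--         return '.'.join(paragraph)
--
-- def samplePara(paragraph_list):
--     """
--     For a longer paragraph, this function splits the paragraph into two small ones which the BERT model can take
--
--     Arguments:
--         paragraph_list {list} : List of all the paragraphs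
--     """
--
--     # takenize the para and send
--
--     sub_paragraphs = []
--     for i, par in enumerate(paragraph_list):
--         _para = par.split(".")
--         sub_paragraphs.append(subPara(_para))
--     ## Extracting the list of sentences
--     final_para = []
--     for i, para in enumerate(sub_paragraphs):
--         if(type(para) == list):
--             for sub_par in para:
--                 final_para.append(sub_par)
--         else:
--             final_para.append(para)
--     return final_para
-- ===== SOURCE B (Python) =====
-- def _nth_dot(par, k):
--     # index of the k-th '.' in par (k >= 1; par has at least k dots)
--     i = -1
--     for _ in range(k):
--         i = par.index(".", i + 1)
--     return i
--
-- def samplePara(paragraph_list):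
--     final_para = []
--     for par in paragraph_list:
--         n = par.count(".") + 1
--         if n > 18:
--             i = _nth_dot(par, n // 2)
--             final_para.append(par[:i])
--             final_para.append(par[i + 1:])
--         else:
--             final_para.append(par)
--     return final_para
-- ===== Notes on version B (the rewrite author's own statement) =====
-- stated objective: alternative
-- what changed: B never splits or joins: it counts the dots in each paragraph, and when there are more than 17 it locates the (n//2)-th dot with repeated str.index and cuts the original string there into the two halves; short paragraphs are passed through unchanged instead of being split and re-joined.
import Mathlib
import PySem

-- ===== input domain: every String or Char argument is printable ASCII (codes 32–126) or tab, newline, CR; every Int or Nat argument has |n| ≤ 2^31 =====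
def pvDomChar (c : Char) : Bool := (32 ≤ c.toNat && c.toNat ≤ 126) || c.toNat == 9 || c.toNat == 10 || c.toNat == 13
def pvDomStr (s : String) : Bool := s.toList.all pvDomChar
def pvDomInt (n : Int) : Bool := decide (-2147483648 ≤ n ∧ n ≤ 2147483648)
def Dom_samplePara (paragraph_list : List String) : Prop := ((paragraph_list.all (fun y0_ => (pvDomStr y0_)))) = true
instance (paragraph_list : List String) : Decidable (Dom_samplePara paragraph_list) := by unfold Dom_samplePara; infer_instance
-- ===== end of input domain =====

-- B never splits/joins: it counts dots per paragraph and, when >18 pieces, cuts the original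
-- string at the (n//2)-th dot located by repeated find; short paragraphs pass through unchanged
-- (objective: alternative; A's split/join round-trip and list halving are gone).


-- ===== PORT A =====
-- subPara returns either a str or a list[str]; ported as a Sum.
def subPara (paragraph : List (List Char)) : (List Char) ⊕ (List (List Char)) :=
  let para_len : Int := (paragraph.length : Int)
  if para_len > 18 then
    Sum.inr [PySem.Chars.join ['.'] (PySem.List.slice paragraph (some 0) (some (PySem.Int.floordiv para_len 2))),
             PySem.Chars.join ['.'] (PySem.List.slice paragraph (some (PySem.Int.floordiv para_len 2)) (some (para_len + 1)))]
  else
    Sum.inl (PySem.Chars.join ['.'] paragraph)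

def samplePara (paragraph_list : List String) : List String :=
  let sub_paragraphs := paragraph_list.map (fun par => subPara (PySem.Chars.splitOn par.toList ['.']))
  (sub_paragraphs.foldl (fun acc para =>
    match para with
    | Sum.inr l => acc ++ l
    | Sum.inl s => acc ++ [s]) []).map String.ofList

-- ===== PORT B =====
-- _nth_dot: i = -1; for _ in range(k): i = par.index('.', i + 1); return i
def pvNthDot (cs : List Char) (k : Int) : Int :=
  (PySem.List.pyRange 0 k).foldl (fun i _ => PySem.Chars.findFrom cs ['.'] (i + 1)) (-1)

def samplePara_alt (paragraph_list : List String) : List String :=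
  paragraph_list.foldl (fun final_para par =>
    let cs := par.toList
    let n : Int := (PySem.Chars.count cs ['.'] : Int) + 1
    if n > 18 then
      let i := pvNthDot cs (PySem.Int.floordiv n 2)
      final_para ++ [String.ofList (PySem.List.slice cs none (some i)),
                     String.ofList (PySem.List.slice cs (some (i + 1)) none)]
    else final_para ++ [par]) []

-- ===== PRECONDITION & SPEC =====
def Spec_samplePara (paragraph_list : List String) (out : List String) : Prop := out = samplePara_alt paragraph_list
instance (paragraph_list : List String) (out : List String) : Decidable (Spec_samplePara paragraph_list out) := by unfold Spec_samplePara; infer_instance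

-- ===== CLAIM (what is proved, stated in full; the proofs are below) =====
def Claim_equal_samplePara : Prop := ∀ (paragraph_list : List String), Dom_samplePara paragraph_list → Spec_samplePara paragraph_list (samplePara paragraph_list)

-- ===== LEMMAS AND PROOFS =====

-- the structural split on '.' used as the common reference
def pvSplit : List Char → List (List Char)
  | [] => [[]]
  | c :: rest =>
    if c = '.' then [] :: pvSplit rest
    else match pvSplit rest with
      | [] => [[c]]
      | p :: ps => (c :: p) :: ps

theorem pvSplit_ne_nil (cs : List Char) : pvSplit cs ≠ [] := by
  induction cs with
  | nil => simp [pvSplit]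
  | cons c rest ih =>
    simp only [pvSplit]
    split_ifs with h
    · simp
    · cases hr : pvSplit rest <;> simp

def pvConsHead (p : List Char) : List (List Char) → List (List Char)
  | [] => [p]
  | q :: qs => (p ++ q) :: qs

theorem pvGo_eq : ∀ (fuel : Nat) (l cur : List Char) (acc : List (List Char)), l.length ≤ fuel →
    PySem.Chars.splitOn.go ['.'] fuel l cur acc = acc.reverse ++ pvConsHead cur.reverse (pvSplit l) := by
  intro fuel
  induction fuel with
  | zero =>
    intro l cur acc h
    have hl : l = [] := by cases l <;> simp_all
    subst hl
    simp [PySem.Chars.splitOn.go, pvSplit, pvConsHead]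
  | succ fuel ih =>
    intro l cur acc h
    cases l with
    | nil => simp [PySem.Chars.splitOn.go, pvSplit, pvConsHead]
    | cons c rest =>
      simp only [PySem.Chars.splitOn.go]
      by_cases hc : c = '.'
      · subst hc
        have hpre : ['.'].isPrefixOf ('.' :: rest) = true := by simp [List.isPrefixOf]
        rw [if_pos hpre]
        simp only [List.length_cons, List.drop_succ_cons, List.length_nil, List.drop_zero]
        rw [ih rest [] (cur.reverse :: acc) (by simpa using Nat.le_of_succ_le_succ h)]
        simp only [pvSplit, if_true]
        cases hr : pvSplit rest with
        | nil => exact absurd hr (pvSplit_ne_nil rest)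
        | cons q qs => simp [pvConsHead]
      · have hpre : ['.'].isPrefixOf (c :: rest) = false := by
          simp [List.isPrefixOf]
          exact fun hh => absurd hh.symm hc
        rw [if_neg (by simp [hpre])]
        rw [ih rest (c :: cur) acc (by simpa using Nat.le_of_succ_le_succ h)]
        simp only [pvSplit, if_neg hc]
        cases hr : pvSplit rest with
        | nil => exact absurd hr (pvSplit_ne_nil rest)
        | cons q qs => simp [pvConsHead]

theorem pvSplitOn_eq (cs : List Char) : PySem.Chars.splitOn cs ['.'] = pvSplit cs := by
  unfold PySem.Chars.splitOn
  rw [pvGo_eq (cs.length + 1) cs [] [] (Nat.le_succ _)]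
  cases hr : pvSplit cs with
  | nil => exact absurd hr (pvSplit_ne_nil cs)
  | cons q qs => simp [pvConsHead]

theorem pvCountGo_eq : ∀ (fuel : Nat) (l : List Char) (acc : Nat), l.length ≤ fuel →
    PySem.Chars.count.go ['.'] fuel l acc = acc + l.count '.' := by
  intro fuel
  induction fuel with
  | zero =>
    intro l acc h
    have hl : l = [] := by cases l <;> simp_all
    subst hl
    simp [PySem.Chars.count.go]
  | succ fuel ih =>
    intro l acc h
    cases l with
    | nil => simp [PySem.Chars.count.go]
    | cons c rest =>
      simp only [PySem.Chars.count.go]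
      by_cases hc : c = '.'
      · subst hc
        have hpre : ['.'].isPrefixOf ('.' :: rest) = true := by simp [List.isPrefixOf]
        rw [if_pos hpre]
        simp only [List.length_cons, List.drop_succ_cons, List.length_nil, List.drop_zero]
        rw [ih rest (acc + 1) (by simpa using Nat.le_of_succ_le_succ h)]
        simp
        omega
      · have hpre : ['.'].isPrefixOf (c :: rest) = false := by
          simp [List.isPrefixOf]
          exact fun hh => absurd hh.symm hc
        rw [if_neg (by simp [hpre])]
        rw [ih rest acc (by simpa using Nat.le_of_succ_le_succ h)]
        simp [hc]

theorem pvCount_eq (cs : List Char) : PySem.Chars.count cs ['.'] = cs.count '.' := by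
  unfold PySem.Chars.count
  rw [if_neg (by simp)]
  rw [pvCountGo_eq cs.length cs 0 le_rfl]
  omega

theorem pvSplit_length (cs : List Char) : (pvSplit cs).length = cs.count '.' + 1 := by
  induction cs with
  | nil => simp [pvSplit]
  | cons c rest ih =>
    simp only [pvSplit]
    split_ifs with h
    · subst h; simp [ih]
    · cases hr : pvSplit rest with
      | nil => exact absurd hr (pvSplit_ne_nil rest)
      | cons q qs =>
        rw [hr] at ih
        simp only [List.length_cons] at ih ⊢
        simp [h, ih]

theorem pvSplit_dotfree (cs : List Char) : ∀ p ∈ pvSplit cs, '.' ∉ p := by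
  induction cs with
  | nil => simp [pvSplit]
  | cons c rest ih =>
    simp only [pvSplit]
    split_ifs with h
    · intro p hp
      rcases List.mem_cons.mp hp with h1 | h1
      · subst h1; simp
      · exact ih p h1
    · cases hr : pvSplit rest with
      | nil => exact absurd hr (pvSplit_ne_nil rest)
      | cons q qs =>
        intro p hp
        rcases List.mem_cons.mp hp with h1 | h1
        · subst h1
          intro hmem
          rcases List.mem_cons.mp hmem with h2 | h2
          · exact h h2.symm
          · exact ih q (hr ▸ List.mem_cons_self) h2
        · exact ih p (hr ▸ List.mem_cons_of_mem q h1)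

theorem pvJoin_eq (cs : List Char) : PySem.Chars.join ['.'] (pvSplit cs) = cs := by
  induction cs with
  | nil => simp [pvSplit, PySem.Chars.join_singleton]
  | cons c rest ih =>
    simp only [pvSplit]
    split_ifs with h
    · subst h
      cases hr : pvSplit rest with
      | nil => exact absurd hr (pvSplit_ne_nil rest)
      | cons q qs =>
        rw [hr] at ih
        rw [PySem.Chars.join_cons_cons]
        simp [ih]
    · cases hr : pvSplit rest with
      | nil => exact absurd hr (pvSplit_ne_nil rest)
      | cons q qs =>
        rw [hr] at ih
        cases qs with
        | nil => simp_all [PySem.Chars.join_singleton]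
        | cons r rs =>
          rw [PySem.Chars.join_cons_cons] at ih ⊢
          simp [← ih]

theorem pvJoin_snoc (t : List (List Char)) (p : List Char) (h : t ≠ []) :
    PySem.Chars.join ['.'] (t ++ [p]) = PySem.Chars.join ['.'] t ++ '.' :: p := by
  induction t with
  | nil => exact absurd rfl h
  | cons a t ih =>
    cases t with
    | nil => simp [PySem.Chars.join_cons_cons, PySem.Chars.join_singleton]
    | cons b r =>
      have hh := ih (by simp)
      simp only [List.cons_append] at hh ⊢
      rw [PySem.Chars.join_cons_cons, hh, PySem.Chars.join_cons_cons]
      simp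

theorem pvJoin_split (s : List (List Char)) (k : Nat) (h1 : 1 ≤ k) (h2 : k < s.length) :
    PySem.Chars.join ['.'] s
      = PySem.Chars.join ['.'] (s.take k) ++ '.' :: PySem.Chars.join ['.'] (s.drop k) := by
  induction s generalizing k with
  | nil => simp at h2
  | cons a t ih =>
    cases k with
    | zero => omega
    | succ k' =>
      cases k' with
      | zero =>
        cases t with
        | nil => simp at h2
        | cons b r =>
          rw [PySem.Chars.join_cons_cons]
          simp [PySem.Chars.join_singleton]
      | succ m =>
        cases t with
        | nil => simp at h2
        | cons b r =>
          have hk2 : m + 1 < (b :: r).length := by simpa using Nat.lt_of_succ_lt_succ h2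
          have iht := ih (m + 1) (by omega) hk2
          simp only [List.take_succ_cons, List.drop_succ_cons] at iht ⊢
          rw [PySem.Chars.join_cons_cons, iht, PySem.Chars.join_cons_cons]
          simp

theorem pvPrefix_single (c : Char) (l : List Char) : [c] <+: l ↔ l.head? = some c := by
  cases l with
  | nil => simp
  | cons x xs => simp [List.cons_prefix_cons, eq_comm]

theorem pvFind_dot (a b : List Char) (h : '.' ∉ a) :
    PySem.Chars.find (a ++ '.' :: b) ['.'] = (a.length : Int) := by
  have hinf : ['.'] <:+: (a ++ '.' :: b) := ⟨a, b, by simp⟩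
  have h0 : 0 ≤ PySem.Chars.find (a ++ '.' :: b) ['.'] :=
    (PySem.Chars.find_nonneg_iff _ _).mpr hinf
  obtain ⟨hpre, hmin⟩ := PySem.Chars.find_spec h0
  set i := (PySem.Chars.find (a ++ '.' :: b) ['.']).toNat with hi
  have hnotlt : ¬ i < a.length := by
    intro hlt
    have hdrop : List.drop i (a ++ '.' :: b) = List.drop i a ++ '.' :: b :=
      List.drop_append_of_le_length (Nat.le_of_lt hlt)
    rw [hdrop] at hpre
    have hda : List.drop i a ≠ [] := by
      intro hnil
      have hlen0 : a.length - i = 0 := by simpa using congrArg List.length hnil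
      omega
    cases hd : List.drop i a with
    | nil => exact hda hd
    | cons x xs =>
      rw [hd] at hpre
      have hh := (pvPrefix_single '.' (x :: (xs ++ '.' :: b))).mp (by simpa using hpre)
      have hx : x = '.' := by simpa using hh
      have hmemx : x ∈ a := by
        have : x ∈ List.drop i a := by rw [hd]; simp
        exact List.mem_of_mem_drop this
      exact h (hx ▸ hmemx)
  have hnotgt : ¬ a.length < i := by
    intro hgt
    apply hmin a.length hgt
    rw [show List.drop a.length (a ++ '.' :: b) = '.' :: b from List.drop_left]
    simp
  have : i = a.length := by omega
  omega

theorem pvNthDot_zero (cs : List Char) : pvNthDot cs 0 = -1 := by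
  unfold pvNthDot
  rw [PySem.List.pyRange_of_pos 0 0 (by norm_num)]
  simp

theorem pvNthDot_succ (cs : List Char) (k : Nat) :
    pvNthDot cs ((k : Int) + 1) = PySem.Chars.findFrom cs ['.'] (pvNthDot cs (k : Int) + 1) := by
  unfold pvNthDot
  rw [PySem.List.pyRange_one_append 0 (k : Int) ((k : Int) + 1) (by omega) (by omega)]
  rw [PySem.List.pyRange_one_cons (show (k : Int) < (k : Int) + 1 by omega)]
  rw [PySem.List.pyRange_of_pos ((k : Int) + 1) ((k : Int) + 1) (show (0:Int) < 1 by norm_num)]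
  simp [List.foldl_append]

theorem pvNthDot_eq (cs : List Char) (j : Nat) (h1 : 1 ≤ j) (h2 : j < (pvSplit cs).length) :
    pvNthDot cs (j : Int)
      = ((PySem.Chars.join ['.'] ((pvSplit cs).take j)).length : Int) := by
  induction j with
  | zero => omega
  | succ j ihj =>
    set s := pvSplit cs with hs
    have hcs : cs = PySem.Chars.join ['.'] s := (pvJoin_eq cs).symm
    by_cases hj0 : j = 0
    · -- the first dot
      subst hj0
      have hlen2 : 2 ≤ s.length := by omega
      have e : ((0 + 1 : Nat) : Int) = ((0 : Nat) : Int) + 1 := by norm_num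
      rw [e, pvNthDot_succ cs 0]
      simp only [Nat.cast_zero]
      rw [pvNthDot_zero]
      simp only [neg_add_cancel, PySem.Chars.findFrom_zero]
      cases hs' : s with
      | nil => rw [hs'] at hlen2; simp at hlen2
      | cons s0 tl =>
        have hsp := pvJoin_split s 1 le_rfl (by omega)
        rw [hs'] at hsp
        simp only [List.take_succ_cons, List.take_zero, List.drop_succ_cons, List.drop_zero] at hsp
        rw [PySem.Chars.join_singleton] at hsp
        have hfree : '.' ∉ s0 := pvSplit_dotfree cs s0 (by rw [← hs, hs']; simp)
        rw [hcs, hs', hsp, pvFind_dot s0 _ hfree]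
        simp [PySem.Chars.join_singleton]
    · -- beyond the first dot
      have hj1 : 1 ≤ j := by omega
      have hj2 : j < s.length := by omega
      have ih := ihj hj1 hj2
      rw [show ((j + 1 : Nat) : Int) = ((j : Nat) : Int) + 1 by push_cast; ring, pvNthDot_succ, ih]
      set X := PySem.Chars.join ['.'] (s.take j) with hX
      have hsplit : PySem.Chars.join ['.'] s = X ++ '.' :: PySem.Chars.join ['.'] (s.drop j) :=
        pvJoin_split s j hj1 hj2
      set Y := PySem.Chars.join ['.'] (s.drop j) with hY
      have hcsXY : cs = (X ++ ['.']) ++ Y := by rw [hcs, hsplit]; simp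
      have hcast : ((X.length : Int) + 1) = (((X.length + 1 : Nat)) : Int) := by push_cast; ring
      have hlenle : X.length + 1 ≤ cs.length := by rw [hcsXY]; simp
      rw [hcast, PySem.Chars.findFrom_natCast cs ['.'] (X.length + 1) hlenle]
      have hdropcs : List.drop (X.length + 1) cs = Y := by
        rw [hcsXY, show X.length + 1 = (X ++ ['.']).length by simp]
        exact List.drop_left
      rw [hdropcs]
      have hjlt : j < s.length := hj2
      have hdropj : List.drop j s = s[j] :: List.drop (j + 1) s := List.drop_eq_getElem_cons hjlt
      have hne : List.drop (j + 1) s ≠ [] := by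
        intro hnil
        have hlen0 : s.length - (j + 1) = 0 := by simpa using congrArg List.length hnil
        omega
      have hYeq : Y = s[j] ++ '.' :: PySem.Chars.join ['.'] (List.drop (j + 1) s) := by
        rw [hY, hdropj]
        cases hd : List.drop (j + 1) s with
        | nil => exact absurd hd hne
        | cons b r =>
          rw [PySem.Chars.join_cons_cons]
          simp
      have hfree : '.' ∉ s[j] := pvSplit_dotfree cs s[j] (by rw [← hs]; exact List.getElem_mem hjlt)
      rw [hYeq, pvFind_dot s[j] _ hfree]
      have hpos : ¬ ((s[j].length : Int) = -1) := by omega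
      rw [if_neg hpos]
      have htakes : s.take (j + 1) = s.take j ++ [s[j]] := by
        rw [← List.take_concat_get hjlt]; simp
      have htne : s.take j ≠ [] := by
        intro hnil
        have hmin0 : min j s.length = 0 := by
          simpa [List.length_take] using congrArg List.length hnil
        rcases Nat.min_eq_zero_iff.mp hmin0 with h' | h' <;> omega
      rw [htakes, pvJoin_snoc _ _ htne, ← hX]
      simp only [List.length_append, List.length_cons]
      push_cast
      ring

theorem pv_floordiv_natCast_two (m : Nat) : PySem.Int.floordiv (m : Int) 2 = ((m / 2 : Nat) : Int) := by
  simp [PySem.Int.floordiv, Int.fdiv_eq_ediv]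

-- A's per-paragraph pieces (flattened, restringed)
def pvToPieces (para : (List Char) ⊕ (List (List Char))) : List (List Char) :=
  match para with
  | Sum.inr l => l
  | Sum.inl s => [s]

-- B's per-paragraph pieces
def pvBPieces (par : String) : List String :=
  let cs := par.toList
  let n : Int := (PySem.Chars.count cs ['.'] : Int) + 1
  if n > 18 then
    let i := pvNthDot cs (PySem.Int.floordiv n 2)
    [String.ofList (PySem.List.slice cs none (some i)),
     String.ofList (PySem.List.slice cs (some (i + 1)) none)]
  else [par]

theorem pvPieces_eq (par : String) :
    (pvToPieces (subPara (PySem.Chars.splitOn par.toList ['.']))).map String.ofList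
      = pvBPieces par := by
  rw [pvSplitOn_eq]
  simp only [subPara, pvBPieces, pvToPieces]
  set cs := par.toList with hcs
  set s := pvSplit cs with hs
  have hlen : s.length = cs.count '.' + 1 := pvSplit_length cs
  have hcnt : PySem.Chars.count cs ['.'] = cs.count '.' := pvCount_eq cs
  have hn : ((PySem.Chars.count cs ['.'] : Int) + 1) = (s.length : Int) := by
    rw [hcnt, hlen]; push_cast; ring
  rw [hn]
  simp only [gt_iff_lt]
  split_ifs with h
  · -- long case: s.length > 18
    have hlen19 : 19 ≤ s.length := by exact_mod_cast h
    set k := s.length / 2 with hk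
    have hk1 : 1 ≤ k := by omega
    have hklt : k < s.length := Nat.div_lt_self (by omega) (by norm_num)
    rw [pv_floordiv_natCast_two, ← hk]
    rw [PySem.List.slice_zero_start, PySem.List.slice_to_natCast]
    have e1 : ((s.length : Int) + 1) = (((s.length + 1 : Nat)) : Int) := by push_cast; ring
    rw [e1, PySem.List.slice_natCast]
    have htk : List.take (s.length + 1 - k) (List.drop k s) = List.drop k s :=
      List.take_of_length_le (by simp; omega)
    rw [htk]
    rw [pvNthDot_eq cs k hk1 (by rw [← hs]; exact hklt)]
    set X := PySem.Chars.join ['.'] (s.take k) with hX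
    set Y := PySem.Chars.join ['.'] (s.drop k) with hY
    have hsplit : PySem.Chars.join ['.'] s = X ++ '.' :: Y := pvJoin_split s k hk1 hklt
    have hcseq : cs = (X ++ ['.']) ++ Y := by
      rw [show cs = PySem.Chars.join ['.'] s from (pvJoin_eq cs).symm, hsplit]; simp
    rw [PySem.List.slice_to_natCast]
    have hcast : ((X.length : Int) + 1) = (((X.length + 1 : Nat)) : Int) := by push_cast; ring
    rw [hcast, PySem.List.slice_from_natCast]
    have htX : List.take X.length cs = X := by
      rw [hcseq, show (X ++ ['.']) ++ Y = X ++ ('.' :: Y) by simp]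
      exact List.take_left' rfl
    have hdY : List.drop (X.length + 1) cs = Y := by
      rw [hcseq, show X.length + 1 = (X ++ ['.']).length by simp]
      exact List.drop_left
    rw [htX, hdY]
    simp
  · -- short case: join (split cs) = cs, and the paragraph passes through
    rw [show PySem.Chars.join ['.'] s = cs from pvJoin_eq cs]
    simp [hcs]

theorem pvAlt_eq_flatMap (paragraph_list : List String) :
    samplePara_alt paragraph_list = paragraph_list.flatMap pvBPieces := by
  unfold samplePara_alt
  have hfun : (fun (final_para : List String) (par : String) =>
      let cs := par.toList
      let n : Int := (PySem.Chars.count cs ['.'] : Int) + 1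
      if n > 18 then
        let i := pvNthDot cs (PySem.Int.floordiv n 2)
        final_para ++ [String.ofList (PySem.List.slice cs none (some i)),
                       String.ofList (PySem.List.slice cs (some (i + 1)) none)]
      else final_para ++ [par])
      = fun final_para par => final_para ++ pvBPieces par := by
    funext final_para par
    simp only [pvBPieces]
    split_ifs <;> rfl
  rw [hfun, PySem.List.foldl_append_eq_flatMap]
  simp

theorem samplePara_spec' (paragraph_list : List String) :
    samplePara paragraph_list = samplePara_alt paragraph_list := by
  unfold samplePara
  have hfun : (fun (acc : List (List Char)) (para : (List Char) ⊕ (List (List Char))) =>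
      match para with
      | Sum.inr l => acc ++ l
      | Sum.inl s => acc ++ [s])
      = fun acc para => acc ++ pvToPieces para := by
    funext acc para; cases para <;> rfl
  rw [hfun]
  simp only [PySem.List.foldl_append_eq_flatMap]
  simp only [List.nil_append, List.map_flatMap, List.flatMap_map]
  rw [pvAlt_eq_flatMap]
  congr 1
  funext par
  exact pvPieces_eq par

-- ===== VERDICT (by name: the statement is the Claim_ definition above) =====
theorem samplePara_spec : Claim_equal_samplePara := by
  intro l _
  exact samplePara_spec' l
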